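-- pv_equiv track=rewrite | github.com/hjk0761/Almumol | hjk0761/04237/4237.py | find
-- ===== SOURCE A (Python) =====
-- def find(n, a):
--     count = 1
--     prev = a[0]
--     downward = True
--     for i in range(1, n):
--         next = a[i]
--         if downward and prev > next:
--             count += 1
--             downward = False
--         elif not downward and prev < next:
--             count += 1
--             downward = True
--         prev = next
--     return count
-- ===== SOURCE B (Python) =====
-- def find(n, a):
--     # Build compressed list of non-zero difference signs (runs), then count.
--     signs = []
--     prev = a[0]
--     for i in range(1, n):
--         x = a[i]
--         d = x - prev
--         if d != 0:
--             s = 1 if d > 0 else -1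
--             if not signs or signs[-1] != s:
--                 signs.append(s)
--         prev = x
--     if not signs:
--         return 1
--     return len(signs) + (0 if signs[0] > 0 else 1)
-- ===== Notes on version B (the rewrite author's own statement) =====
-- stated objective: alternative
-- what changed: Instead of threading a count and a boolean direction state through one pass, B builds the compressed list of non-zero difference signs (monotonic runs) and returns its length plus a correction for whether the first run descends.
import Mathlib
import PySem

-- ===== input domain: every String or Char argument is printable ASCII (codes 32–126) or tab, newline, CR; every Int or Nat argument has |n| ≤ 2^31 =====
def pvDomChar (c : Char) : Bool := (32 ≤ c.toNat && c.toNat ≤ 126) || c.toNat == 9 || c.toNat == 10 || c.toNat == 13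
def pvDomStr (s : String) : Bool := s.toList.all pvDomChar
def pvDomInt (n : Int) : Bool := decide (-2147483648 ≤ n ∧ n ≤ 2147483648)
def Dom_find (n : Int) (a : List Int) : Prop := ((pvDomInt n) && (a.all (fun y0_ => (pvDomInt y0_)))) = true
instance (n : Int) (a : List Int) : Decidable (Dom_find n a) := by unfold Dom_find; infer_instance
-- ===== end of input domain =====

-- B replaces A's count/direction state machine by building a compressed list of run signs and counting it (alternative decomposition, same cost).

-- ===== PORT A =====
-- state: (count, prev, downward)
def stepA (a : List Int) (st : Int × Int × Bool) (i : Int) : Int × Int × Bool :=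
  let next := (PySem.List.pyGet? a i).getD 0
  if st.2.2 && decide (st.2.1 > next) then (st.1 + 1, next, false)
  else if (!st.2.2) && decide (st.2.1 < next) then (st.1 + 1, next, true)
  else (st.1, next, st.2.2)

def find (n : Int) (a : List Int) : Int :=
  ((PySem.List.pyRange 1 n 1).foldl (stepA a) (1, (PySem.List.pyGet? a 0).getD 0, true)).1

-- ===== PORT B =====
-- state: (signs, prev)
def stepB (a : List Int) (st : List Int × Int) (i : Int) : List Int × Int :=
  let x := (PySem.List.pyGet? a i).getD 0
  let d := x - st.2
  if d ≠ 0 then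
    let s : Int := if d > 0 then 1 else -1
    if st.1 = [] ∨ st.1.getLast? ≠ some s then (st.1 ++ [s], x) else (st.1, x)
  else (st.1, x)

def find_alt (n : Int) (a : List Int) : Int :=
  let st := (PySem.List.pyRange 1 n 1).foldl (stepB a) ([], (PySem.List.pyGet? a 0).getD 0)
  match st.1 with
  | [] => 1
  | sg :: rest => ((sg :: rest).length : Int) + (if sg > 0 then 0 else 1)

-- ===== PRECONDITION & SPEC =====
-- A indexes a[0] and a[i] for i in range(1, n); it raises IndexError when a is empty or n exceeds len(a).
def Pre_find (n : Int) (a : List Int) : Prop := a ≠ [] ∧ n ≤ (a.length : Int)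
instance (n : Int) (a : List Int) : Decidable (Pre_find n a) := by unfold Pre_find; infer_instance
def pvWitness_find : Int × List Int := (4, [3, 1, 2, 2])

def Spec_find (n : Int) (a : List Int) (out : Int) : Prop := out = find_alt n a
instance (n : Int) (a : List Int) (out : Int) : Decidable (Spec_find n a out) := by unfold Spec_find; infer_instance

-- ===== CLAIM (what is proved, stated in full; the proofs are below) =====
def Claim_equal_find : Prop := ∀ (n : Int) (a : List Int), Dom_find n a → Pre_find n a → Spec_find n a (find n a)

-- ===== LEMMAS AND PROOFS =====

-- abstraction functions from B's state to A's count and direction flag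
def fcount (signs : List Int) : Int :=
  match signs with
  | [] => 1
  | sg :: rest => ((sg :: rest).length : Int) + (if sg > 0 then 0 else 1)

def dw (signs : List Int) : Bool := decide (signs.getLast?.getD 1 = 1)

def okSigns (signs : List Int) : Prop := ∀ v ∈ signs, v = 1 ∨ v = -1

theorem fcount_concat (signs : List Int) (s : Int) :
    fcount (signs ++ [s]) =
      match signs with
      | [] => (1 : Int) + (if s > 0 then 0 else 1)
      | sg :: rest => fcount (sg :: rest) + 1 := by
  cases signs with
  | nil => simp [fcount]
  | cons sg rest =>
    simp [fcount]
    ring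

theorem dw_concat (signs : List Int) (s : Int) :
    dw (signs ++ [s]) = decide (s = 1) := by
  simp [dw]

theorem okSigns_concat (signs : List Int) (s : Int) (hok : okSigns signs)
    (hs : s = 1 ∨ s = -1) : okSigns (signs ++ [s]) := by
  intro w hw
  rcases List.mem_append.mp hw with h | h
  · exact hok w h
  · have hws : w = s := by simpa using h
    subst hws; exact hs

theorem step_inv (a : List Int) (signs : List Int) (prev : Int) (i : Int)
    (hok : okSigns signs) :
    stepA a (fcount signs, prev, dw signs) i =
      ((fcount (stepB a (signs, prev) i).1, (stepB a (signs, prev) i).2,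
        dw (stepB a (signs, prev) i).1)) ∧ okSigns (stepB a (signs, prev) i).1 := by
  unfold stepA stepB
  set x := (PySem.List.pyGet? a i).getD 0 with hx
  rcases lt_trichotomy prev x with hlt | heq | hgt
  · -- ascent
    have hd : x - prev ≠ 0 := by omega
    have hdpos : x - prev > 0 := by omega
    have hgt : ¬ (prev > x) := by omega
    simp only [ne_eq, hd, not_false_eq_true, if_pos hdpos, hgt, decide_false,
      Bool.and_false, Bool.false_eq_true, if_false, decide_true, hlt, Bool.and_true, if_pos]
    cases signs with
    | nil =>
      simp [fcount, dw, okSigns]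
    | cons sg rest =>
      by_cases hlast : (sg :: rest).getLast? = some (1 : Int)
      · have hdw : dw (sg :: rest) = true := by simp [dw, hlast]
        simp [hdw, hlast]
        exact hok
      · have hv' : (sg :: rest).getLast? = some (-1 : Int) := by
          rcases hlx : (sg :: rest).getLast? with _ | v
          · simp [List.getLast?_eq_none_iff] at hlx
          · have hv := hok v (List.mem_of_getLast? hlx)
            rcases hv with h | h
            · exact absurd (by rw [hlx, h]) hlast
            · rw [h]
        have hdw : dw (sg :: rest) = false := by simp [dw, hv']
        have hne : ¬ (sg :: rest).getLast? = some (1 : Int) := hlast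
        simp only [hdw, Bool.not_false, if_pos, hne,
          not_false_eq_true, or_true]
        refine ⟨?_, okSigns_concat _ _ hok (Or.inl rfl)⟩
        have h1 : fcount ((sg :: rest) ++ [1]) = fcount (sg :: rest) + 1 := fcount_concat _ _
        have h2 : dw ((sg :: rest) ++ [1]) = true := by rw [dw_concat]; simp
        simp [fcount]
        exact ⟨by split_ifs <;> ring, h2⟩
  · -- equal: nothing happens
    have hd : ¬ (x - prev ≠ 0) := by omega
    have h1 : ¬ (prev > x) := by omega
    have h2 : ¬ (prev < x) := by omega
    simp [hd, h1, h2]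
    exact hok
  · -- descent
    have hd : x - prev ≠ 0 := by omega
    have hdpos : ¬ (x - prev > 0) := by omega
    have hlt : ¬ (prev < x) := by omega
    simp only [ne_eq, hd, not_false_eq_true, if_true, if_neg hdpos, hgt, decide_true,
      Bool.and_true, hlt, decide_false, Bool.and_false, Bool.false_eq_true, if_false]
    cases signs with
    | nil =>
      simp [fcount, dw, okSigns]
    | cons sg rest =>
      by_cases hlast : (sg :: rest).getLast? = some (-1 : Int)
      · have hdw : dw (sg :: rest) = false := by simp [dw, hlast]
        simp [hdw, hlast]
        exact hok
      · have hv' : (sg :: rest).getLast? = some (1 : Int) := by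
          rcases hlx : (sg :: rest).getLast? with _ | v
          · simp [List.getLast?_eq_none_iff] at hlx
          · have hv := hok v (List.mem_of_getLast? hlx)
            rcases hv with h | h
            · rw [h]
            · exact absurd (by rw [hlx, h]) hlast
        have hdw : dw (sg :: rest) = true := by simp [dw, hv']
        simp only [hdw, if_pos, hlast, not_false_eq_true, or_true]
        refine ⟨?_, okSigns_concat _ _ hok (Or.inr rfl)⟩
        have h1 : fcount ((sg :: rest) ++ [-1]) = fcount (sg :: rest) + 1 := fcount_concat _ _
        have h2 : dw ((sg :: rest) ++ [-1]) = false := by rw [dw_concat]; simp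
        simp [fcount]
        exact ⟨by split_ifs <;> ring, h2⟩

theorem fold_inv (a : List Int) (l : List Int) (signs : List Int) (prev : Int)
    (hok : okSigns signs) :
    (l.foldl (stepA a) (fcount signs, prev, dw signs)).1 =
      fcount (l.foldl (stepB a) (signs, prev)).1 := by
  induction l generalizing signs prev with
  | nil => simp [fcount]
  | cons i t ih =>
    obtain ⟨heq, hok'⟩ := step_inv a signs prev i hok
    simp only [List.foldl_cons, heq]
    have := ih (stepB a (signs, prev) i).1 (stepB a (signs, prev) i).2 hok'
    simpa using this

-- ===== VERDICT (by name: the statement is the Claim_ definition above) =====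
theorem find_spec : Claim_equal_find := by
  intro n a _ _
  unfold Spec_find find find_alt
  have h := fold_inv a (PySem.List.pyRange 1 n 1) [] ((PySem.List.pyGet? a 0).getD 0)
    (by intro v hv; simp at hv)
  simp only [fcount, dw] at h ⊢
  rw [show (decide (((List.getLast? ([]:List Int)).getD 1) = 1)) = true by decide] at h
  rw [h]
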